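-- pv_equiv track=rewrite | github.com/stormalinblue/adventofcode | 2023/day11/part2.py | down_distance
-- ===== SOURCE A (Python) =====
-- def down_distance(row1, row2, empty_rows):
--     _row1 = min(row1, row2)
--     _row2 = max(row1, row2)
--
--     if row1 == row2:
--         return 0
--     d = 0
--     for i in range(_row1 + 1, _row2):
--         if i in empty_rows:
--             d += 1000000
--         else:
--             d += 1
--     return d + 1
-- ===== SOURCE B (Python) =====
-- def down_distance(row1, row2, empty_rows):
--     if row1 == row2:
--         return 0
--     lo, hi = (row1, row2) if row1 < row2 else (row2, row1)
--     k = len({e for e in empty_rows if lo < e < hi})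
--     return (hi - lo) + 999999 * k
-- ===== Notes on version B (the rewrite author's own statement) =====
-- stated objective: alternative
-- what changed: Replaces A's loop over every row between row1 and row2 (with a membership scan per row) by a closed form: one pass over empty_rows counting distinct empty rows strictly between the two rows, then (hi-lo) + 999999*k.
import Mathlib
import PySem

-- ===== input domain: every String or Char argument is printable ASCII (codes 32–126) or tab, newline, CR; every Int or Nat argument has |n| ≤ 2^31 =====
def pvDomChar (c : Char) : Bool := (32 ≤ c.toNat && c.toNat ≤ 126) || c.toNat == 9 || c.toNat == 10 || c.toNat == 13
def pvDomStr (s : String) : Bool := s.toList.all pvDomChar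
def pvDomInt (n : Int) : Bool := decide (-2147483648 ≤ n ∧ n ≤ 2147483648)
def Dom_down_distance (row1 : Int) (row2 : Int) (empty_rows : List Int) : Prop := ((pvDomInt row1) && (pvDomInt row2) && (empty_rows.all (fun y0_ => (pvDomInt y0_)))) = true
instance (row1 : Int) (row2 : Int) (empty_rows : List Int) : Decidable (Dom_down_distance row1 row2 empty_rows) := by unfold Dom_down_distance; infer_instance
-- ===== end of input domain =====

-- B replaces A's loop over the rows between row1 and row2 by a single pass over empty_rows counting distinct empty rows in the interval, plus a closed form.

-- ===== PORT A =====
def down_distance (row1 : Int) (row2 : Int) (empty_rows : List Int) : Int :=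
  let _row1 := min row1 row2
  let _row2 := max row1 row2
  if row1 = row2 then 0
  else
    let d := (PySem.List.pyRange (_row1 + 1) _row2 1).foldl
      (fun d i => if i ∈ empty_rows then d + 1000000 else d + 1) 0
    d + 1

-- ===== PORT B =====
def down_distance_alt (row1 : Int) (row2 : Int) (empty_rows : List Int) : Int :=
  if row1 = row2 then 0
  else
    let lo := if row1 < row2 then row1 else row2
    let hi := if row1 < row2 then row2 else row1
    let k : Int := (PySem.Set.ofList (empty_rows.filter (fun e => decide (lo < e) && decide (e < hi)))).length
    (hi - lo) + 999999 * k

-- ===== PRECONDITION & SPEC =====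
def Spec_down_distance (row1 : Int) (row2 : Int) (empty_rows : List Int) (out : Int) : Prop := out = down_distance_alt row1 row2 empty_rows
instance (row1 : Int) (row2 : Int) (empty_rows : List Int) (out : Int) : Decidable (Spec_down_distance row1 row2 empty_rows out) := by unfold Spec_down_distance; infer_instance

-- ===== CLAIM (what is proved, stated in full; the proofs are below) =====
def Claim_equal_down_distance : Prop := ∀ (row1 : Int) (row2 : Int) (empty_rows : List Int), Dom_down_distance row1 row2 empty_rows → Spec_down_distance row1 row2 empty_rows (down_distance row1 row2 empty_rows)

-- ===== LEMMAS AND PROOFS =====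

-- A's loop body, summed: base + one per row + 999999 extra per empty row hit.
theorem fold_sum (er : List Int) (l : List Int) (d : Int) :
    l.foldl (fun d i => if i ∈ er then d + 1000000 else d + 1) d
    = d + l.length + 999999 * ((l.filter (fun i => decide (i ∈ er))).length) := by
  induction l generalizing d with
  | nil => simp
  | cons a l ih =>
    by_cases h : a ∈ er <;> simp [List.foldl, h, ih] <;> ring

-- The rows of (lo,hi) lying in er and the distinct elements of er lying in (lo,hi) are the same set.
theorem count_eq (lo hi : Int) (er : List Int) :
    ((PySem.List.pyRange (lo + 1) hi 1).filter (fun i => decide (i ∈ er))).length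
    = (PySem.Set.ofList (er.filter (fun e => decide (lo < e) && decide (e < hi)))).length := by
  apply List.Perm.length_eq
  rw [List.perm_ext_iff_of_nodup
      (List.Nodup.filter _ (PySem.List.nodup_pyRange_one _ _))
      (PySem.Set.nodup_ofList _)]
  intro x
  simp [PySem.Set.mem_ofList, PySem.List.mem_pyRange_one]
  tauto

-- ===== VERDICT (by name: the statement is the Claim_ definition above) =====
theorem down_distance_spec : Claim_equal_down_distance := by
  intro row1 row2 er _
  unfold Spec_down_distance down_distance down_distance_alt
  by_cases heq : row1 = row2
  · simp [heq]
  · simp only [heq, if_false]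
    rcases lt_or_gt_of_ne heq with h | h
    · simp only [min_eq_left h.le, max_eq_right h.le, if_pos h]
      rw [fold_sum, count_eq, PySem.List.length_pyRange_one]
      have : ((row2 - (row1 + 1)).toNat : Int) = row2 - row1 - 1 := by omega
      rw [this]; ring
    · have h' : ¬ row1 < row2 := not_lt.mpr h.le
      simp only [min_eq_right h.le, max_eq_left h.le, if_neg h']
      rw [fold_sum, count_eq, PySem.List.length_pyRange_one]
      have : ((row1 - (row2 + 1)).toNat : Int) = row1 - row2 - 1 := by omega
      rw [this]; ring
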